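-- pv_equiv track=rewrite | github.com/threefoldo/allennlp | scripts/adr_util.py | split_mark
-- ===== SOURCE A (Python) =====
-- def split_mark(token):
--     '''
--     check last character
--     '''
--
--     # check special cases
--     if token == '...':
--         return [token]
--
--     new_tokens = []
--     last_token = ''
--     for ch in token:
--         if ch in [',', '!', ':', '~', '"']:
--             if len(last_token) > 0:
--                 new_tokens.append(last_token)
--             new_tokens.append(ch)
--             last_token = ''
--         else:
--             last_token += ch
--
--     # check period mark '.' at the end
--     if len(last_token) > 0:
--         if last_token[-1] == '.':
--             new_tokens.append(last_token[:-1])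
--             new_tokens.append('.')
--         else:
--             new_tokens.append(last_token)
--     return new_tokens
-- ===== SOURCE B (Python) =====
-- import re
--
-- _PUNCT = (',', '!', ':', '~', '"')
--
-- def split_mark(token):
--     if token == '...':
--         return [token]
--     parts = re.findall(r'[,!:~"]|[^,!:~"]+', token)
--     if parts and parts[-1] not in _PUNCT and parts[-1].endswith('.'):
--         last = parts.pop()
--         parts.append(last[:-1])
--         parts.append('.')
--     return parts
-- ===== Notes on version B (the rewrite author's own statement) =====
-- stated objective: faster
-- what changed: Replaces the character-by-character accumulator loop with a one-shot regex tokenization (punctuation marks or maximal non-punctuation runs, matched in C by re.findall) followed by a single fix-up of the last element for a trailing period.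
import Mathlib
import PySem

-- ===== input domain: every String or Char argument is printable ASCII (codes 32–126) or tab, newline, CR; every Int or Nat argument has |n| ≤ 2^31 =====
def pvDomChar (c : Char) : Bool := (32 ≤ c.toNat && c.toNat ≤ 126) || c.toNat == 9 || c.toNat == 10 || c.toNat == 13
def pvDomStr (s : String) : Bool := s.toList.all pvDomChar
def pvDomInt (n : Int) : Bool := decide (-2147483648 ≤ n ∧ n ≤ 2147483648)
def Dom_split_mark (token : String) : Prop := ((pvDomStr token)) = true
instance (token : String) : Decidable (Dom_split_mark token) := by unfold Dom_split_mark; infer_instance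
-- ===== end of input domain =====

-- B replaces A's character-accumulator loop by one-shot tokenization into punctuation
-- marks / maximal non-punctuation runs, then a single fix-up of the last element (measured faster: the scan runs in re's C engine).

-- ===== PORT A =====
-- ch in [',', '!', ':', '~', '"']
def pvPunct (c : Char) : Bool := c = ',' || c = '!' || c = ':' || c = '~' || c = '"'

-- A's for-loop over the characters, state = (new_tokens, last_token as List Char)
def pvLoopA : List Char → List String → List Char → (List String × List Char)
  | [], acc, last => (acc, last)
  | c :: cs, acc, last =>
    if pvPunct c then
      pvLoopA cs ((if last.length > 0 then acc ++ [String.ofList last] else acc) ++ [String.ofList [c]]) []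
    else
      pvLoopA cs acc (last ++ [c])

def split_mark (token : String) : List String :=
  if token = "..." then [token]
  else
    let p := pvLoopA token.toList [] []
    if p.2.length > 0 then
      if p.2.getLast? = some '.' then        -- last_token[-1] == '.'
        p.1 ++ [String.ofList p.2.dropLast, "."] -- last_token[:-1] (nonempty list: exact)
      else p.1 ++ [String.ofList p.2]
    else p.1

-- ===== PORT B =====
-- re.findall(r'[,!:~"]|[^,!:~"]+', token): each punctuation char alone, each maximal
-- run of non-punctuation chars as one token (hand port of the regex scan; exact).
def pvFindall : List Char → List String
  | [] => []
  | c :: cs =>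
    if pvPunct c then String.ofList [c] :: pvFindall cs
    else
      String.ofList ((c :: cs).takeWhile (fun x => !pvPunct x)) ::
        pvFindall ((c :: cs).dropWhile (fun x => !pvPunct x))
  termination_by l => l.length
  decreasing_by
    · simp
    · simp [List.dropWhile, *]
      exact List.length_dropWhile_le _ _

def pvPunctStrs : List String := [",", "!", ":", "~", "\""]

def split_mark_alt (token : String) : List String :=
  if token = "..." then [token]
  else
    let parts := pvFindall token.toList
    match parts.getLast? with
    | none => parts
    | some last =>
      if last ∉ pvPunctStrs ∧ last.toList.getLast? = some '.' then  -- endswith('.')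
        parts.dropLast ++ [String.ofList last.toList.dropLast, "."]     -- last[:-1]
      else parts

-- ===== PRECONDITION & SPEC =====
def Spec_split_mark (token : String) (out : List String) : Prop := out = split_mark_alt token
instance (token : String) (out : List String) : Decidable (Spec_split_mark token out) := by unfold Spec_split_mark; infer_instance

-- ===== CLAIM (what is proved, stated in full; the proofs are below) =====
def Claim_equal_split_mark : Prop := ∀ (token : String), Dom_split_mark token → Spec_split_mark token (split_mark token)

-- ===== LEMMAS AND PROOFS =====

theorem pvLoopA_acc (cs : List Char) (acc : List String) (last : List Char) :
    pvLoopA cs acc last = (acc ++ (pvLoopA cs [] last).1, (pvLoopA cs [] last).2) := by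
  induction cs generalizing acc last with
  | nil => simp [pvLoopA]
  | cons c cs ih =>
    by_cases hp : pvPunct c
    · simp only [pvLoopA, hp, if_true]
      rw [ih, ih ((if last.length > 0 then [] ++ [String.ofList last] else []) ++ [String.ofList [c]])]
      by_cases h0 : last.length > 0 <;> simp [h0]
    · simp only [pvLoopA, hp]
      exact ih _ _

theorem pvTakeDrop_run (l : List Char) (h : ∀ x ∈ l, ¬ pvPunct x) (c : Char) (hc : pvPunct c)
    (cs : List Char) :
    (l ++ c :: cs).takeWhile (fun x => !pvPunct x) = l ∧
    (l ++ c :: cs).dropWhile (fun x => !pvPunct x) = c :: cs := by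
  induction l with
  | nil => simp [hc]
  | cons a as ih =>
    have ha : ¬ pvPunct a := h a (by simp)
    have := ih (fun x hx => h x (by simp [hx]))
    simp [ha, this.1, this.2]

theorem pvFindall_run (l : List Char) (h : ∀ x ∈ l, ¬ pvPunct x) (hne : l ≠ []) :
    pvFindall l = [String.ofList l] := by
  cases l with
  | nil => simp at hne
  | cons a as =>
    have ha : ¬ pvPunct a := h a (by simp)
    have ht : (a :: as).takeWhile (fun x => !pvPunct x) = a :: as :=
      List.takeWhile_eq_self_iff.mpr (by intro x hx; simp [h x hx])
    have hd : (a :: as).dropWhile (fun x => !pvPunct x) = [] :=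
      List.dropWhile_eq_nil_iff.mpr (by intro x hx; simp [h x hx])
    simp [pvFindall, ha, ht, hd]

theorem pvFindall_flush (l : List Char) (h : ∀ x ∈ l, ¬ pvPunct x) (c : Char) (hc : pvPunct c)
    (cs : List Char) :
    pvFindall (l ++ c :: cs) =
      (if l = [] then [] else [String.ofList l]) ++ String.ofList [c] :: pvFindall cs := by
  cases l with
  | nil => simp [pvFindall, hc]
  | cons a as =>
    have ha : ¬ pvPunct a := h a (by simp)
    have htd := pvTakeDrop_run (a :: as) h c hc cs
    rw [show ((a :: as) ++ c :: cs : List Char) = a :: (as ++ c :: cs) from rfl]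
    rw [pvFindall]
    simp only [ha, Bool.false_eq_true, if_false]
    rw [show (a :: (as ++ c :: cs) : List Char) = (a :: as) ++ c :: cs from rfl, htd.1, htd.2]
    simp [pvFindall, hc]

-- main invariant relating A's loop (with pending run `last`) to B's tokenization
theorem pvMain (cs : List Char) (last : List Char) (h : ∀ x ∈ last, ¬ pvPunct x) :
    (∀ x ∈ (pvLoopA cs [] last).2, ¬ pvPunct x) ∧
    pvFindall (last ++ cs) =
      (pvLoopA cs [] last).1 ++
        (if (pvLoopA cs [] last).2 = [] then [] else [String.ofList (pvLoopA cs [] last).2]) ∧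
    ((pvLoopA cs [] last).2 = [] →
      (pvLoopA cs [] last).1 = [] ∨
        ∃ e c, pvPunct c ∧ (pvLoopA cs [] last).1 = e ++ [String.ofList [c]]) := by
  induction cs generalizing last with
  | nil =>
    refine ⟨h, ?_, ?_⟩
    · by_cases hne : last = []
      · simp [hne, pvLoopA, pvFindall]
      · simp [pvLoopA, hne, pvFindall_run last h hne]
    · intro hl; left; simp [pvLoopA]
  | cons c cs ih =>
    by_cases hp : pvPunct c
    · have ih0 := ih [] (by simp)
      simp only [pvLoopA, hp, if_true]
      rw [pvLoopA_acc]
      set flush := (if last.length > 0 then ([] : List String) ++ [String.ofList last] else []) ++ [String.ofList [c]] with hflush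
      refine ⟨ih0.1, ?_, ?_⟩
      · have hcs : pvFindall cs = (pvLoopA cs [] []).1 ++
            (if (pvLoopA cs [] []).2 = [] then []
             else [String.ofList (pvLoopA cs [] []).2]) := by simpa using ih0.2.1
        rw [pvFindall_flush last h c hp cs, hcs, hflush]
        by_cases h0 : last = [] <;> simp [h0, List.length_pos_iff]
      · intro hr2
        rcases ih0.2.2 hr2 with he | ⟨e, c', hc', he⟩
        · right; exact ⟨(if last.length > 0 then ([] : List String) ++ [String.ofList last] else []), c, hp, by simp [he, hflush]⟩
        · right; exact ⟨flush ++ e, c', hc', by simp [he]⟩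
    · simp only [pvLoopA, hp]
      have := ih (last ++ [c]) (by
        intro x hx
        rcases List.mem_append.mp hx with h1 | h1
        · exact h x h1
        · simp at h1; simp [h1, hp])
      simpa using this

theorem pvMk_notin_punctStrs (l : List Char) (h : ∀ x ∈ l, ¬ pvPunct x) :
    String.ofList l ∉ pvPunctStrs := by
  intro hm
  simp only [pvPunctStrs, List.mem_cons, List.not_mem_nil, or_false] at hm
  rcases hm with h1|h1|h1|h1|h1 <;>
  · have hl := congrArg String.toList h1
    simp at hl
    subst hl
    exact h _ (List.mem_singleton.mpr rfl) (by decide)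

-- ===== VERDICT (by name: the statement is the Claim_ definition above) =====
theorem split_mark_spec : Claim_equal_split_mark := by
  intro token _
  unfold Spec_split_mark split_mark split_mark_alt
  by_cases hdots : token = "..."
  · simp [hdots]
  · simp only [hdots, if_false]
    obtain ⟨hnop, hfa, hlastp⟩ := pvMain token.toList [] (by simp)
    set p := pvLoopA token.toList [] [] with hp
    simp only [List.nil_append] at hfa
    by_cases hr : p.2 = []
    · -- A returns p.1; B's parts = p.1, last element (if any) is a punct singleton
      simp only [hr, if_true, List.length_nil, gt_iff_lt, Nat.lt_irrefl, if_false] at hfa ⊢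
      rw [hfa]
      simp only [List.append_nil]
      rcases hlastp hr with he | ⟨e, c, hc, he⟩
      · simp [he]
      · rw [he]
        have : (e ++ [String.ofList [c]]).getLast? = some (String.ofList [c]) := by simp
        rw [this]
        have hin : String.ofList [c] ∈ pvPunctStrs := by
          simp only [pvPunct, Bool.or_eq_true, decide_eq_true_eq] at hc
          rcases hc with ((((h1|h1)|h1)|h1)|h1) <;> subst h1 <;> decide
        simp [hin]
    · -- pending run nonempty
      have hlen : p.2.length > 0 := List.length_pos_iff.mpr hr
      simp only [hr, if_false, hlen, if_true] at hfa ⊢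
      rw [hfa]
      have hglast : (p.1 ++ [String.ofList p.2]).getLast? = some (String.ofList p.2) := by simp
      rw [hglast]
      have hnotin := pvMk_notin_punctStrs p.2 hnop
      have htl : (String.ofList p.2).toList = p.2 := by simp
      by_cases hdot : p.2.getLast? = some '.'
      · simp [hdot, hnotin, htl]
      · simp [hdot, hnotin, htl]
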